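-- pv_equiv track=rewrite | github.com/LiamStaudinger/HuffmanProject | writer_bot.py | print_text
-- ===== SOURCE A (Python) =====
-- def print_text(tlist):
--     '''
--     This function formats the text into ten words per line.
--
--     Parameters:
--         tlist (list): A list of words generated using the Markov chain.
--     Returns:
--         line (str): A string containing the text with ten words per line.
--     '''
--     line = ''
--     counter = 0
--     for word in tlist:
--         line += word + ' '
--         counter += 1
--         if counter % 10 == 0:
--             line += '\n'
--     return line
-- ===== SOURCE B (Python) =====
-- def print_text(tlist):
--     '''
--     This function formats the text into ten words per line.
--
--     Parameters:
--         tlist (list): A list of words generated using the Markov chain.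
--     Returns:
--         line (str): A string containing the text with ten words per line.
--     '''
--     blocks = []
--     i = 0
--     while i < len(tlist):
--         chunk = tlist[i:i+10]
--         block = ' '.join(chunk) + ' '
--         if len(chunk) == 10:
--             block += '\n'
--         blocks.append(block)
--         i += 10
--     return ''.join(blocks)
-- ===== Notes on version B (the rewrite author's own statement) =====
-- stated objective: alternative
-- what changed: Replaced the per-word loop with a modulo-10 counter by a chunking loop that slices ten words at a time, joins each chunk with spaces, appends the newline per full chunk and concatenates the blocks at the end.
import Mathlib
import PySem

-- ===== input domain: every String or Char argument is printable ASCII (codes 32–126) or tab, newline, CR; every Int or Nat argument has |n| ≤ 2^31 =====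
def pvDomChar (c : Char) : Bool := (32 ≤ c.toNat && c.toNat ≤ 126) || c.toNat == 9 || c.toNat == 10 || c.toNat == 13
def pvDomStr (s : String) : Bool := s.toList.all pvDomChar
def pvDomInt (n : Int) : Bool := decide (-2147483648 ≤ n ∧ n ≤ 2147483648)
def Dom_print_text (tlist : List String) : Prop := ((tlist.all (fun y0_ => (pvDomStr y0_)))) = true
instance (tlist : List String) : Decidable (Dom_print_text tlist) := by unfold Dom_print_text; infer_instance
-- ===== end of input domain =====

-- B replaces A's per-word loop with a modulo-10 counter by a chunk-of-ten slicing loop; same return value, alternative decomposition.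

-- ===== PORT A =====
-- literal transliteration of A: one fold over the words carrying (line, counter)
def print_text (tlist : List String) : String :=
  (tlist.foldl
    (fun (st : String × Int) word =>
      let line := st.1 ++ word ++ " "
      let counter := st.2 + 1
      if PySem.Int.mod counter 10 = 0 then (line ++ "\n", counter) else (line, counter))
    ("", 0)).1

-- ===== PORT B =====
-- literal transliteration of Source B's while-loop: step an index by ten, slice the chunk, collect blocks
def print_text_altLoop (tlist : List String) (i : Int) (blocks : List String) : List String :=
  if _h : i < (tlist.length : Int) then
    let chunk := PySem.List.slice tlist (some i) (some (i + 10))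
    let block0 := PySem.Str.join " " chunk ++ " "
    let block := if chunk.length = 10 then block0 ++ "\n" else block0
    print_text_altLoop tlist (i + 10) (blocks ++ [block])
  else blocks
termination_by ((tlist.length : Int) - i).toNat
decreasing_by omega

def print_text_alt (tlist : List String) : String :=
  PySem.Str.join "" (print_text_altLoop tlist 0 [])

-- ===== PRECONDITION & SPEC =====
def Spec_print_text (tlist : List String) (out : String) : Prop := out = print_text_alt tlist
instance (tlist : List String) (out : String) : Decidable (Spec_print_text tlist out) := by unfold Spec_print_text; infer_instance

-- ===== CLAIM (what is proved, stated in full; the proofs are below) =====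
def Claim_equal_print_text : Prop := ∀ (tlist : List String), Dom_print_text tlist → Spec_print_text tlist (print_text tlist)

-- ===== LEMMAS AND PROOFS =====

-- characters produced by A's loop starting with counter value c
def pvCharF : List String → Int → List Char
  | [], _ => []
  | w :: ws, c =>
      w.toList ++ [' '] ++ (if PySem.Int.mod (c + 1) 10 = 0 then ['\n'] else []) ++ pvCharF ws (c + 1)

-- characters of one block: each word followed by a space
def pvBlockOf (chunk : List (List Char)) : List Char := chunk.flatMap (fun w => w ++ [' '])

lemma pvFoldA (l : List String) (s : String) (c : Int) :
    ((l.foldl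
      (fun (st : String × Int) word =>
        let line := st.1 ++ word ++ " "
        let counter := st.2 + 1
        if PySem.Int.mod counter 10 = 0 then (line ++ "\n", counter) else (line, counter))
      (s, c)).1).toList = s.toList ++ pvCharF l c := by
  induction l generalizing s c with
  | nil => simp [pvCharF]
  | cons w ws ih =>
      simp only [List.foldl_cons, pvCharF]
      split_ifs with h
      · rw [ih]; simp [List.append_assoc]
      · rw [ih]; simp [List.append_assoc]

lemma pvCharF_periodic (l : List String) (c : Int) : pvCharF l (c + 10) = pvCharF l c := by
  induction l generalizing c with
  | nil => rfl
  | cons w ws ih =>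
      simp only [pvCharF]
      have h10 : (0:Int) < 10 := by norm_num
      have hmod : PySem.Int.mod (c + 10 + 1) 10 = PySem.Int.mod (c + 1) 10 := by
        rw [PySem.Int.mod_eq_emod_of_pos h10, PySem.Int.mod_eq_emod_of_pos h10]; omega
      rw [hmod]
      have harith : c + 10 + 1 = (c + 1) + 10 := by ring
      rw [harith, ih]

lemma pvCharF_chunk (k : Nat) : ∀ (l : List String) (c : Int), k + 1 ≤ 10 →
    PySem.Int.mod c 10 = 10 - (k + 1 : Nat) →
    pvCharF l c = pvBlockOf ((l.take (k+1)).map String.toList) ++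
      (if k + 1 ≤ l.length then ['\n'] else []) ++ pvCharF (l.drop (k+1)) (c + (k+1)) := by
  induction k with
  | zero =>
      intro l c _ hc
      cases l with
      | nil => simp [pvCharF, pvBlockOf]
      | cons w ws =>
          have h10 : (0:Int) < 10 := by norm_num
          have hc' : PySem.Int.mod (c + 1) 10 = 0 := by
            rw [PySem.Int.mod_eq_emod_of_pos h10]
            rw [PySem.Int.mod_eq_emod_of_pos h10] at hc
            push_cast at hc
            omega
          simp only [pvCharF, hc', pvBlockOf, List.take_succ_cons, List.take_zero,
            List.drop_succ_cons, List.drop_zero, List.map_cons, List.map_nil, List.flatMap_cons,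
            List.flatMap_nil, List.length_cons]
          push_cast
          simp [List.append_assoc]
  | succ k ih =>
      intro l c hk hc
      cases l with
      | nil => simp [pvCharF, pvBlockOf]
      | cons w ws =>
          have h10 : (0:Int) < 10 := by norm_num
          have hne : PySem.Int.mod (c + 1) 10 = 10 - (k + 1 : Nat) := by
            rw [PySem.Int.mod_eq_emod_of_pos h10]
            rw [PySem.Int.mod_eq_emod_of_pos h10] at hc
            push_cast at hc ⊢
            omega
          have hne0 : ¬ PySem.Int.mod (c + 1) 10 = 0 := by
            rw [hne]; push_cast; omega
          have hrec := ih ws (c + 1) (by omega) hne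
          simp only [pvCharF, hne0, if_false, hrec, pvBlockOf, List.take_succ_cons,
            List.drop_succ_cons, List.flatMap_cons, List.map_cons, List.length_cons]
          push_cast
          rw [show c + 1 + ((k:Int) + 1) = c + ((k:Int) + 1 + 1) from by ring]
          simp [List.append_assoc]

lemma pvJoinNil (parts : List (List Char)) : PySem.Chars.join [] parts = parts.flatten := by
  induction parts with
  | nil => simp [PySem.Chars.join_nil]
  | cons p rest ih =>
      cases rest with
      | nil => simp [PySem.Chars.join_singleton]
      | cons q r => rw [PySem.Chars.join_cons_cons, List.flatten_cons, ← ih]; simp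

lemma pvFlatJoin (bs : List String) :
    (PySem.Str.join "" bs).toList = (bs.map String.toList).flatten := by
  rw [PySem.Str.toList_join]
  have : ("" : String).toList = [] := rfl
  rw [this, pvJoinNil]

lemma pvBlockJoin (chunk : List String) (h : chunk ≠ []) :
    (PySem.Str.join " " chunk ++ " ").toList = pvBlockOf (chunk.map String.toList) := by
  induction chunk with
  | nil => exact absurd rfl h
  | cons w ws ih =>
      cases ws with
      | nil =>
          simp [PySem.Str.toList_join, PySem.Chars.join_singleton, pvBlockOf]
      | cons v vs =>
          have hlist : (PySem.Str.join " " (w :: v :: vs)).toList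
              = w.toList ++ [' '] ++ (PySem.Str.join " " (v :: vs)).toList := by
            simp [PySem.Str.toList_join, PySem.Chars.join_cons_cons]
          have ih' := ih (by simp)
          simp only [String.toList_append, hlist, pvBlockOf, List.map_cons, List.flatMap_cons] at *
          rw [List.append_assoc, ih']

-- proof-side reference loop: same blocks, produced from the remaining suffix of the list
def pvLoop (rest : List String) (blocks : List String) : List String :=
  if h : rest = [] then blocks
  else
    let chunk := rest.take 10
    let block0 := PySem.Str.join " " chunk ++ " "
    let block := if chunk.length = 10 then block0 ++ "\n" else block0
    pvLoop (rest.drop 10) (blocks ++ [block])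
termination_by rest.length
decreasing_by
  have : rest.length ≠ 0 := by simpa using h
  simp only [List.length_drop]
  omega

lemma pvAltLoop_step (l : List String) (bs : List String) (h : ¬ l = []) :
    pvLoop l bs = pvLoop (l.drop 10)
      (bs ++ [if (l.take 10).length = 10 then PySem.Str.join " " (l.take 10) ++ " " ++ "\n"
              else PySem.Str.join " " (l.take 10) ++ " "]) := by
  conv_lhs => rw [pvLoop]
  simp only [h, dite_false]

-- the index-stepping port B loop computes the reference loop on the remaining suffix
lemma pvAltLoop_eq_pvLoop (tlist : List String) : ∀ (m k : Nat), tlist.length - k ≤ m →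
    ∀ (bs : List String), print_text_altLoop tlist (k : Int) bs = pvLoop (tlist.drop k) bs := by
  intro m
  induction m with
  | zero =>
      intro k hk bs
      have hge : ¬ ((k : Int) < (tlist.length : Int)) := by
        omega
      have hdrop : tlist.drop k = [] := by
        apply List.drop_eq_nil_of_le; omega
      rw [print_text_altLoop, pvLoop]
      simp [hge, hdrop]
  | succ m ih =>
      intro k hk bs
      by_cases hlt : (k : Int) < (tlist.length : Int)
      · have hklen : k < tlist.length := by exact_mod_cast hlt
        have hdrop_ne : tlist.drop k ≠ [] := by
          simp only [ne_eq, List.drop_eq_nil_iff]; omega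
        rw [print_text_altLoop]
        simp only [hlt, dite_true]
        have hslice : PySem.List.slice tlist (some (k : Int)) (some ((k : Int) + 10))
            = (tlist.drop k).take 10 := by
          have := PySem.List.slice_natCast_add (xs := tlist) (j := k) (n := 10)
          push_cast at this ⊢
          exact this
        rw [hslice]
        have hstep : ((k : Int) + 10) = ((k + 10 : Nat) : Int) := by push_cast; ring
        rw [hstep, ih (k + 10) (by omega)]
        conv_rhs => rw [pvAltLoop_step _ _ hdrop_ne]
        rw [List.drop_drop]
      · have hdrop : tlist.drop k = [] := by
          apply List.drop_eq_nil_of_le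
          push_cast at hlt; omega
        rw [print_text_altLoop, pvLoop]
        simp [hlt, hdrop]

lemma pvAltLoop_acc (n : Nat) : ∀ (l : List String), l.length ≤ n → ∀ (bs : List String),
    pvLoop l bs = bs ++ pvLoop l [] := by
  induction n with
  | zero =>
      intro l hl bs
      have : l = [] := by cases l <;> simp_all
      subst this; simp [pvLoop]
  | succ n ih =>
      intro l hl bs
      by_cases h : l = []
      · subst h; simp [pvLoop]
      · have hlen : (l.drop 10).length ≤ n := by
          have : l.length ≠ 0 := by simpa using h
          simp only [List.length_drop]; omega
        conv_lhs => rw [pvAltLoop_step l bs h, ih _ hlen]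
        conv_rhs => rw [pvAltLoop_step l [] h, ih _ hlen]
        simp

lemma pvMainLoop (n : Nat) : ∀ (l : List String), l.length ≤ n →
    ((pvLoop l []).map String.toList).flatten = pvCharF l 0 := by
  induction n with
  | zero =>
      intro l hl
      have : l = [] := by cases l <;> simp_all
      subst this
      simp [pvLoop, pvCharF]
  | succ n ih =>
      intro l hl
      by_cases h : l = []
      · subst h
        simp [pvLoop, pvCharF]
      · have hlen : (l.drop 10).length ≤ n := by
          have : l.length ≠ 0 := by simpa using h
          simp only [List.length_drop]; omega
        have htake_ne : l.take 10 ≠ [] := by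
          cases l with
          | nil => exact absurd rfl h
          | cons a as => simp
        -- unfold one iteration of the reference loop
        rw [pvAltLoop_step l [] h]
        rw [pvAltLoop_acc (l.drop 10).length _ le_rfl]
        rw [List.nil_append]
        simp only [List.map_append, List.map_cons, List.map_nil, List.flatten_append,
          List.flatten_cons, List.flatten_nil, List.append_nil]
        rw [ih (l.drop 10) hlen]
        -- characterize A's output on the first chunk
        have hchunkA := pvCharF_chunk 9 l 0 (by omega) (by decide)
        norm_num at hchunkA
        rw [hchunkA]
        have hper : pvCharF (l.drop 10) (0 + 10) = pvCharF (l.drop 10) 0 :=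
          pvCharF_periodic (l.drop 10) 0
        norm_num at hper
        rw [hper]
        -- it remains to match the first block
        have hcond : ((l.take 10).length = 10) ↔ (10 ≤ l.length) := by
          simp [List.length_take]
        by_cases hfull : 10 ≤ l.length
        · rw [if_pos (hcond.mpr hfull), if_pos hfull]
          have hb : ((PySem.Str.join " " (l.take 10) ++ " ") ++ "\n").toList
              = pvBlockOf ((l.take 10).map String.toList) ++ ['\n'] := by
            rw [String.toList_append, pvBlockJoin _ htake_ne]; rfl
          rw [hb]
          simp [List.append_assoc]
        · rw [if_neg (fun hx => hfull (hcond.mp hx)), if_neg hfull]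
          rw [pvBlockJoin _ htake_ne]
          simp

lemma pvMain (l : List String) : (print_text_alt l).toList = pvCharF l 0 := by
  rw [print_text_alt]
  have h0 : (0 : Int) = ((0 : Nat) : Int) := rfl
  rw [h0, pvAltLoop_eq_pvLoop l l.length 0 (by omega)]
  rw [List.drop_zero, pvFlatJoin]
  exact pvMainLoop l.length l le_rfl

-- ===== VERDICT (by name: the statement is the Claim_ definition above) =====
theorem print_text_spec : Claim_equal_print_text := by
  intro tlist _
  unfold Spec_print_text print_text
  apply String.toList_inj.mp
  rw [pvFoldA]
  rw [pvMain tlist]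
  rfl
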